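-- pv_equiv track=rewrite | github.com/JeiKeiLim/TIL | coding_test/leetcode/2593_Find_Score_of_Array_After_Marking.py | findScore2
-- ===== SOURCE A (Python) =====
-- from typing import List
--
-- def findScore2(nums: List[int]) -> int:
--     """
--     O(n log n)
--     """
--     score = 0
--     sorted_nums = sorted(enumerate(nums), key=lambda x: x[1], reverse=False)
--     s_idx = [x[0] for x in sorted_nums]
--
--     i = 0
--
--     while i < len(s_idx):
--         smallest_idx = s_idx[i]
--         i += 1
--         if nums[smallest_idx] < 1:
--             continue
--
--         score += nums[smallest_idx]
--
--         nums[smallest_idx] = -1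
--         if smallest_idx > 0 and nums[smallest_idx - 1] > 0:
--             nums[smallest_idx - 1] = -1
--         if smallest_idx < len(nums)-1 and nums[smallest_idx + 1] > 0:
--             nums[smallest_idx + 1] = -1
--
--     return score
-- ===== SOURCE B (Python) =====
-- def findScore2(nums):
--     """
--     No sorting: repeatedly scan for the smallest still-eligible value (ties by
--     lowest index), add it, and mark it and its neighbors in a boolean array.
--     (A mutates its argument in place; B does not - equivalence is about the
--     return value.)
--     """
--     n = len(nums)
--     marked = [False] * n
--     score = 0
--     while True:
--         best = -1
--         for i, v in enumerate(nums):
--             if v >= 1 and not marked[i] and (best < 0 or v < nums[best]):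
--                 best = i
--         if best < 0:
--             break
--         score += nums[best]
--         marked[best] = True
--         if best > 0:
--             marked[best - 1] = True
--         if best + 1 < n:
--             marked[best + 1] = True
--     return score
-- ===== Notes on version B (the rewrite author's own statement) =====
-- stated objective: alternative
-- what changed: B drops A's sort entirely: instead of precomputing the value-sorted index list and walking it, B repeatedly scans the array for the smallest still-unmarked positive value (ties broken by lowest index) and records markings in a separate boolean array, never mutating nums.
import Mathlib
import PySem

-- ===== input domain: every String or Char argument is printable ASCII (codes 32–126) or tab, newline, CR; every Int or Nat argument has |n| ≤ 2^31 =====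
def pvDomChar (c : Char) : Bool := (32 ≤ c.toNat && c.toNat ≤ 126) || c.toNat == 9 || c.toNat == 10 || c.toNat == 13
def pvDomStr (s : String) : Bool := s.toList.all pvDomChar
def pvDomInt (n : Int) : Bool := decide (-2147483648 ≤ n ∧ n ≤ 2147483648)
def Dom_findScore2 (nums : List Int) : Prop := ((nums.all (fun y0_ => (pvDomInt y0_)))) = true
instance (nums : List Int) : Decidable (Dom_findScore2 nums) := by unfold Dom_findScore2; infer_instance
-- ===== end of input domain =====

-- B does no sorting: it repeatedly scans for the smallest unmarked positive value and marks
-- a boolean array; A mutates its Python argument in place, B does not — the equivalence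
-- proved is about the RETURN value only.

-- ===== PORT A =====
-- A's guarded left-neighbour write: if smallest_idx > 0 and nums[smallest_idx-1] > 0: nums[smallest_idx-1] = -1
def aMarkL (ns : List Int) (idx : Int) : List Int :=
  if idx > 0 ∧ PySem.List.pyGetD ns (idx - 1) 0 > 0
  then PySem.List.pySetD ns (idx - 1) (-1) else ns

-- A's guarded right-neighbour write: if smallest_idx < len(nums)-1 and nums[smallest_idx+1] > 0: nums[smallest_idx+1] = -1
def aMarkR (ns : List Int) (idx : Int) : List Int :=
  if idx < (ns.length : Int) - 1 ∧ PySem.List.pyGetD ns (idx + 1) 0 > 0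
  then PySem.List.pySetD ns (idx + 1) (-1) else ns

-- one iteration of A's while loop: state = (current nums list, score), input = smallest_idx
def aStep (st : List Int × Int) (idx : Int) : List Int × Int :=
  if PySem.List.pyGetD st.1 idx 0 < 1 then st
  else (aMarkR (aMarkL (PySem.List.pySetD st.1 idx (-1)) idx) idx,
        st.2 + PySem.List.pyGetD st.1 idx 0)

def findScore2 (nums : List Int) : Int :=
  let sortedNums := PySem.List.sorted (PySem.List.enumerate nums) (fun x => x.2) false
  let sIdx := sortedNums.map (fun x => x.1)
  (sIdx.foldl aStep (nums, 0)).2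

-- ===== PORT B =====
-- body of B's inner 'for i, v in enumerate(nums)' scan updating 'best'
def bScan (nums : List Int) (marked : List Bool) (best : Int) (p : Int × Int) : Int :=
  if 1 ≤ p.2 ∧ PySem.List.pyGetD marked p.1 false = false ∧
     (best < 0 ∨ p.2 < PySem.List.pyGetD nums best 0)
  then p.1 else best

-- B's scan for the best index: best = -1; for i, v in enumerate(nums): ...
def bFind (nums : List Int) (marked : List Bool) : Int :=
  (PySem.List.enumerate nums).foldl (bScan nums marked) (-1)

-- B's three marked[...] = True writes after choosing best
def bMark (marked : List Bool) (best : Int) (n : Nat) : List Bool :=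
  let m1 := PySem.List.pySetD marked best true
  let m2 := if best > 0 then PySem.List.pySetD m1 (best - 1) true else m1
  if best + 1 < (n : Int) then PySem.List.pySetD m2 (best + 1) true else m2

-- B's 'while True' loop; fuel nums.length + 1 suffices: every scoring pass flips a fresh
-- marked entry to true, so after at most nums.length passes the scan returns -1 and breaks
def bLoop (nums : List Int) : Nat → List Bool → Int → Int
  | 0, _, score => score
  | fuel + 1, marked, score =>
    let best := bFind nums marked
    if best < 0 then score
    else bLoop nums fuel (bMark marked best nums.length)
           (score + PySem.List.pyGetD nums best 0)

def findScore2_alt (nums : List Int) : Int :=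
  bLoop nums (nums.length + 1) (List.replicate nums.length false) 0

-- ===== PRECONDITION & SPEC =====
def Spec_findScore2 (nums : List Int) (out : Int) : Prop := out = findScore2_alt nums
instance (nums : List Int) (out : Int) : Decidable (Spec_findScore2 nums out) := by unfold Spec_findScore2; infer_instance

-- ===== CLAIM (what is proved, stated in full; the proofs are below) =====
def Claim_equal_findScore2 : Prop := ∀ (nums : List Int), Dom_findScore2 nums → Spec_findScore2 nums (findScore2 nums)

-- ===== LEMMAS AND PROOFS =====

-- common ideal step: state = (marked set, score); both programs are reduced to this fold
def bStep (st : PySem.Set Int × Int) (p : Int × Int) : PySem.Set Int × Int :=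
  if p.2 < 1 ∨ p.1 ∈ st.1 then st
  else (PySem.Set.update st.1 [p.1 - 1, p.1, p.1 + 1], st.2 + p.2)

-- strict / non-strict lexicographic (value, index) order on enumerate pairs
def plt (p q : Int × Int) : Prop := p.2 < q.2 ∨ (p.2 = q.2 ∧ p.1 < q.1)
def ple (p q : Int × Int) : Prop := p.2 < q.2 ∨ (p.2 = q.2 ∧ p.1 ≤ q.1)

-- eligibility of an enumerate pair for B's scan
def eligB (marked : List Bool) (p : Int × Int) : Prop :=
  1 ≤ p.2 ∧ PySem.List.pyGetD marked p.1 false = false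

-- the candidate pair currently held by B's scan variable best
def cnd (nums : List Int) (b : Int) : List (Int × Int) :=
  if b = -1 then [] else [(b, nums.getD b.toNat 0)]

-- "r is the lex-least eligible candidate among cs (or -1 if none is eligible)"
def isMin (nums : List Int) (marked : List Bool) (r : Int) (cs : List (Int × Int)) : Prop :=
  (r = -1 ∧ ∀ p ∈ cs, ¬ eligB marked p) ∨
  (∃ k : Nat, r = (k : Int) ∧ k < nums.length ∧ ((k : Int), nums.getD k 0) ∈ cs ∧
     eligB marked ((k : Int), nums.getD k 0) ∧
     ∀ p ∈ cs, eligB marked p → ple ((k : Int), nums.getD k 0) p)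

theorem plt_mk {a b c d : Int} : plt (a, b) (c, d) ↔ (b < d ∨ (b = d ∧ a < c)) := Iff.rfl
theorem ple_mk {a b c d : Int} : ple (a, b) (c, d) ↔ (b < d ∨ (b = d ∧ a ≤ c)) := Iff.rfl

theorem getD_set {α : Type} (xs : List α) (i j : Nat) (v d : α) :
    (xs.set i v).getD j d = if i = j ∧ j < xs.length then v else xs.getD j d := by
  simp [List.getD_eq_getElem?_getD, List.getElem?_set]
  split_ifs <;> simp_all

theorem pyGetD_int (xs : List Int) (i : Int) (d : Int) (h0 : 0 ≤ i) (h1 : i < xs.length) :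
    PySem.List.pyGetD xs i d = xs.getD i.toNat d := by
  rw [PySem.List.pyGetD_eq_getElem xs d h0 h1, List.getD_eq_getElem]

theorem length_aMarkL (ns : List Int) (idx : Int) : (aMarkL ns idx).length = ns.length := by
  unfold aMarkL; split_ifs <;> simp [PySem.List.length_pySetD]

theorem length_aMarkR (ns : List Int) (idx : Int) : (aMarkR ns idx).length = ns.length := by
  unfold aMarkR; split_ifs <;> simp [PySem.List.length_pySetD]

theorem aMarkL_getD (xs : List Int) (k j : Nat) (hj : j < xs.length) :
    (aMarkL xs ((k : Int))).getD j 0 =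
      if j + 1 = k ∧ 0 < xs.getD j 0 then -1 else xs.getD j 0 := by
  unfold aMarkL
  by_cases hk0 : k = 0
  · subst hk0
    rw [if_neg (by rintro ⟨h, -⟩; norm_num at h), if_neg (by omega)]
  · have e1 : ((k : Int)) - 1 = (((k - 1 : Nat)) : Int) := by omega
    rw [e1]
    simp only [PySem.List.pyGetD_natCast, PySem.List.pySetD_natCast]
    by_cases hg : 0 < xs.getD (k - 1) 0
    · rw [if_pos ⟨by positivity, hg⟩, getD_set]
      by_cases hjk : j + 1 = k
      · have hj' : k - 1 = j := by omega
        rw [if_pos ⟨hj', hj⟩, if_pos ⟨hjk, by rwa [hj'] at hg⟩]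
      · rw [if_neg (by rintro ⟨h, -⟩; omega), if_neg (by rintro ⟨h, -⟩; exact hjk h)]
    · rw [if_neg (by rintro ⟨-, h⟩; exact hg h), if_neg]
      rintro ⟨h1, h2⟩
      have hj' : k - 1 = j := by omega
      rw [hj'] at hg
      exact hg h2

theorem aMarkR_getD (xs : List Int) (k j : Nat) (hj : j < xs.length) :
    (aMarkR xs ((k : Int))).getD j 0 =
      if j = k + 1 ∧ 0 < xs.getD j 0 then -1 else xs.getD j 0 := by
  unfold aMarkR
  have e2 : ((k : Int)) + 1 = (((k + 1 : Nat)) : Int) := by omega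
  rw [e2]
  simp only [PySem.List.pyGetD_natCast, PySem.List.pySetD_natCast]
  by_cases hg : ((k : Int)) < ((xs.length : Nat) : Int) - 1 ∧ 0 < xs.getD (k + 1) 0
  · rw [if_pos hg, getD_set]
    by_cases hjk : j = k + 1
    · subst hjk
      rw [if_pos ⟨rfl, hj⟩, if_pos ⟨rfl, hg.2⟩]
    · rw [if_neg (by rintro ⟨h, -⟩; exact hjk h.symm), if_neg (by rintro ⟨h, -⟩; exact hjk h)]
  · rw [if_neg hg, if_neg]
    rintro ⟨rfl, h2⟩
    exact hg ⟨by omega, h2⟩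

-- pointwise description of A's three writes, at a Nat index
theorem aMark_getD (ns : List Int) (k j : Nat) (_hk : k < ns.length) (hj : j < ns.length) :
    (aMarkR (aMarkL (PySem.List.pySetD ns ((k : Int)) (-1)) ((k : Int))) ((k : Int))).getD j 0 =
      if j = k then -1
      else if (j + 1 = k ∨ j = k + 1) ∧ 0 < ns.getD j 0 then -1
      else ns.getD j 0 := by
  rw [PySem.List.pySetD_natCast]
  have hj1 : j < (ns.set k (-1)).length := by simpa using hj
  have hj2 : j < (aMarkL (ns.set k (-1)) ((k : Int))).length := by
    rw [length_aMarkL]; exact hj1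
  rw [aMarkR_getD _ k j hj2, aMarkL_getD _ k j hj1, getD_set]
  split_ifs <;> omega

-- A's fold over the sorted index list equals the ideal marked-set fold over the sorted pairs
theorem loop_inv (o : List Int) (ps : List (Int × Int))
    (hps : ∀ p ∈ ps, ∃ (k : Nat) (h : k < o.length), p = ((k : Int), o[k]))
    (ns : List Int) (m : PySem.Set Int) (sc : Int)
    (hlen : ns.length = o.length)
    (hinv : ∀ (j : Nat), j < o.length →
      ns.getD j 0 = if ((j : Int) ∈ m ∧ 0 < o.getD j 0) then -1 else o.getD j 0) :
    ((ps.map (fun x => x.1)).foldl aStep (ns, sc)).2 = (ps.foldl bStep (m, sc)).2 := by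
  induction ps generalizing ns m sc with
  | nil => rfl
  | cons p ps ih =>
    obtain ⟨k, hk, rfl⟩ := hps _ (List.mem_cons_self ..)
    have hps' : ∀ p ∈ ps, ∃ (k : Nat) (h : k < o.length), p = ((k : Int), o[k]) :=
      fun p hp => hps p (List.mem_cons_of_mem _ hp)
    have hko : o[k] = o.getD k 0 := (List.getD_eq_getElem o 0 hk).symm
    have hgk : PySem.List.pyGetD ns ((k : Int)) 0 = ns.getD k 0 := by
      rw [pyGetD_int ns _ 0 (by positivity) (by rw [hlen]; exact_mod_cast hk)]; simp
    rw [List.map_cons, List.foldl_cons, List.foldl_cons]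
    by_cases hv : o.getD k 0 < 1
    · -- value non-positive: both sides skip
      have hns : ns.getD k 0 = o.getD k 0 := by
        rw [hinv k hk, if_neg]; rintro ⟨-, h2⟩; omega
      have ha : aStep (ns, sc) ((k : Int)) = (ns, sc) := by
        simp only [aStep, hgk, hns]; rw [if_pos hv]
      have hb : bStep (m, sc) ((k : Int), o[k]) = (m, sc) := by
        simp only [bStep]; rw [if_pos (Or.inl (by omega))]
      rw [ha, hb]
      exact ih hps' ns m sc hlen hinv
    · by_cases hm : ((k : Int)) ∈ m
      · -- index already marked: both sides skip
        have hns : ns.getD k 0 = -1 := by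
          rw [hinv k hk, if_pos ⟨hm, by omega⟩]
        have ha : aStep (ns, sc) ((k : Int)) = (ns, sc) := by
          simp only [aStep, hgk, hns]; rw [if_pos (by norm_num)]
        have hb : bStep (m, sc) ((k : Int), o[k]) = (m, sc) := by
          simp only [bStep]; rw [if_pos (Or.inr hm)]
        rw [ha, hb]
        exact ih hps' ns m sc hlen hinv
      · -- score it; A writes -1s, the ideal fold marks the three indices
        have hns : ns.getD k 0 = o.getD k 0 := by
          rw [hinv k hk, if_neg]; rintro ⟨h1, -⟩; exact hm h1
        have ha : aStep (ns, sc) ((k : Int)) =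
            (aMarkR (aMarkL (PySem.List.pySetD ns ((k : Int)) (-1)) ((k : Int))) ((k : Int)),
             sc + o.getD k 0) := by
          simp only [aStep, hgk, hns]; rw [if_neg (by omega)]
        have hb : bStep (m, sc) ((k : Int), o[k]) =
            (PySem.Set.update m [((k : Int)) - 1, ((k : Int)), ((k : Int)) + 1], sc + o.getD k 0) := by
          simp only [bStep]
          rw [hko, if_neg]
          rintro (h | h)
          · omega
          · exact hm h
        rw [ha, hb]
        apply ih hps'
        · rw [length_aMarkR, length_aMarkL, PySem.List.length_pySetD]; exact hlen
        · intro j hj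
          have hjn : j < ns.length := by omega
          have hkn : k < ns.length := by omega
          rw [aMark_getD ns k j hkn hjn, hinv j hj]
          have hmem : (((j : Int)) ∈ PySem.Set.update m [((k : Int)) - 1, ((k : Int)), ((k : Int)) + 1]) ↔
              (((j : Int)) ∈ m ∨ j + 1 = k ∨ j = k ∨ j = k + 1) := by
            rw [PySem.Set.mem_update]
            simp only [List.mem_cons, List.not_mem_nil, or_false]
            constructor
            · rintro (h | h | h | h)
              · exact Or.inl h
              · right; left; omega
              · right; right; left; omega
              · right; right; right; omega
            · rintro (h | h | h | h)
              · exact Or.inl h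
              · right; left; omega
              · right; right; left; omega
              · right; right; right; omega
          rw [if_congr (iff_of_eq (congrArg (· ∧ 0 < o.getD j 0) (propext hmem))) rfl rfl]
          by_cases hjm : ((j : Int)) ∈ m <;> by_cases hoj : 0 < o.getD j 0 <;>
            by_cases hjk : j = k <;>
            simp only [hjm, hoj, hjk, true_and, and_true, and_false,
              true_or, or_true, false_or, if_true, if_false] <;>
            split_ifs <;> first | rfl | omega

-- inserting x (whose index exceeds every index in acc) keeps the lex order
theorem insertBy_lex (x : Int × Int) (acc : List (Int × Int))
    (hp : acc.Pairwise plt) (hidx : ∀ a ∈ acc, a.1 < x.1) :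
    (PySem.List.insertBy (fun a b => decide (a.2 < b.2)) x acc).Pairwise plt := by
  induction acc with
  | nil => simp [PySem.List.insertBy]
  | cons y ys ih =>
    rw [List.pairwise_cons] at hp
    by_cases hb : x.2 < y.2
    · simp only [PySem.List.insertBy, hb, decide_true, if_true]
      refine List.Pairwise.cons ?_ (List.Pairwise.cons hp.1 hp.2)
      intro z hz
      rcases List.mem_cons.mp hz with rfl | hz
      · exact Or.inl hb
      · rcases hp.1 z hz with h | ⟨h, -⟩
        · exact Or.inl (lt_trans hb h)
        · exact Or.inl (by omega)
    · simp only [PySem.List.insertBy, hb, decide_false]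
      refine List.Pairwise.cons ?_ (ih hp.2 (fun a ha => hidx a (List.mem_cons_of_mem _ ha)))
      intro z hz
      rw [PySem.List.mem_insertBy] at hz
      rcases hz with rfl | hz
      · rcases lt_or_eq_of_le (le_of_not_gt hb) with h | h
        · exact Or.inl h
        · exact Or.inr ⟨h, hidx y (List.mem_cons_self ..)⟩
      · exact hp.1 z hz

-- a stable sort by value of an index-increasing list is (value, index)-lexicographically sorted
theorem sorted_lex (l : List (Int × Int)) (h : l.Pairwise (fun p q => p.1 < q.1)) :
    (PySem.List.sorted l (fun x => x.2) false).Pairwise plt := by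
  rw [PySem.List.sorted_eq_foldl_insertBy]
  suffices H : ∀ (l acc : List (Int × Int)), acc.Pairwise plt →
      (∀ a ∈ acc, ∀ b ∈ l, a.1 < b.1) → l.Pairwise (fun p q => p.1 < q.1) →
      (l.foldl (fun acc x => PySem.List.insertBy (fun a b => decide (a.2 < b.2)) x acc) acc).Pairwise plt by
    exact H l [] (List.Pairwise.nil) (by simp) h
  intro l
  induction l with
  | nil => intro acc h1 _ _; exact h1
  | cons x l ih =>
    intro acc h1 h2 h3
    rw [List.pairwise_cons] at h3
    rw [List.foldl_cons]
    apply ih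
    · exact insertBy_lex x acc h1 (fun a ha => h2 a ha x (List.mem_cons_self ..))
    · intro a ha b hb
      rw [PySem.List.mem_insertBy] at ha
      rcases ha with rfl | ha
      · exact h3.1 b hb
      · exact h2 a ha b (List.mem_cons_of_mem _ hb)
    · exact h3.2

-- invariant of B's scan fold: the result is the lex-least eligible candidate
theorem find_inv (nums : List Int) (marked : List Bool) (xs : List (Int × Int)) :
    ∀ (b : Int),
    (∀ p ∈ xs, ∃ k : Nat, k < nums.length ∧ p = ((k : Int), nums.getD k 0)) →
    xs.Pairwise (fun p q => p.1 < q.1) →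
    (b = -1 ∨ ∃ k' : Nat, b = (k' : Int) ∧ k' < nums.length ∧
       eligB marked ((k' : Int), nums.getD k' 0) ∧ ∀ p ∈ xs, b < p.1) →
    isMin nums marked (xs.foldl (bScan nums marked) b) (cnd nums b ++ xs) := by
  induction xs with
  | nil =>
    intro b _ _ hb
    rcases hb with rfl | ⟨k', rfl, hk', he, -⟩
    · exact Or.inl ⟨rfl, by simp [cnd]⟩
    · refine Or.inr ⟨k', rfl, hk', ?_, he, ?_⟩
      · simp only [cnd, List.append_nil]
        rw [if_neg (by omega)]
        simp
      · intro p hp hep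
        simp only [cnd, List.append_nil] at hp
        rw [if_neg (by omega)] at hp
        simp only [List.mem_singleton] at hp
        subst hp
        simp only [Int.toNat_natCast]
        exact Or.inr ⟨rfl, le_refl _⟩
  | cons p xs ih =>
    intro b hsh hpw hb
    obtain ⟨k, hk, rfl⟩ := hsh _ (List.mem_cons_self ..)
    have hsh' := fun q hq => hsh q (List.mem_cons_of_mem _ hq)
    rw [List.pairwise_cons] at hpw
    rw [List.foldl_cons]
    by_cases hc : 1 ≤ nums.getD k 0 ∧ PySem.List.pyGetD marked ((k : Int)) false = false ∧
        (b < 0 ∨ nums.getD k 0 < PySem.List.pyGetD nums b 0)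
    · -- the scan takes index k
      have hstep : bScan nums marked b ((k : Int), nums.getD k 0) = ((k : Int)) := by
        simp only [bScan]; rw [if_pos hc]
      rw [hstep]
      have hek : eligB marked ((k : Int), nums.getD k 0) := ⟨hc.1, hc.2.1⟩
      have hres := ih ((k : Int)) hsh' hpw.2
        (Or.inr ⟨k, rfl, hk, hek, fun q hq => by exact_mod_cast hpw.1 q hq⟩)
      have hcndk : cnd nums ((k : Int)) = [((k : Int), nums.getD k 0)] := by
        simp only [cnd]; rw [if_neg (by omega)]; simp
      rcases hres with ⟨-, hall⟩ | ⟨k₀, hr, hk₀, hmem, he₀, hmin⟩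
      · exact absurd (hall _ (by rw [hcndk]; exact List.mem_append_left _ (List.mem_singleton.mpr rfl))) (not_not_intro hek)
      · refine Or.inr ⟨k₀, hr, hk₀, ?_, he₀, ?_⟩
        · rw [hcndk] at hmem
          rcases List.mem_append.mp hmem with hm | hm
          · simp only [List.mem_singleton] at hm
            exact List.mem_append_right _ (by rw [hm]; exact List.mem_cons_self ..)
          · exact List.mem_append_right _ (List.mem_cons_of_mem _ hm)
        · intro q hq heq
          rcases List.mem_append.mp hq with hm | hm
          · -- q is the old candidate b = k', strictly beaten by value
            simp only [cnd] at hm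
            by_cases hbneg : b = -1
            · rw [if_pos hbneg] at hm; cases hm
            · rw [if_neg hbneg] at hm
              simp only [List.mem_singleton] at hm
              rcases hb with rfl | ⟨k', rfl, hk', -, -⟩
              · simp at hbneg
              · subst hm
                have hlt : nums.getD k 0 < nums.getD k' 0 := by
                  rcases hc.2.2 with h | h
                  · omega
                  · rwa [PySem.List.pyGetD_natCast] at h
                have h₀k := hmin _ (by rw [hcndk]; exact List.mem_append_left _ (List.mem_singleton.mpr rfl)) hek
                simp only [Int.toNat_natCast]
                rw [ple_mk] at h₀k ⊢
                left
                omega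
          · rcases List.mem_cons.mp hm with rfl | hm
            · exact hmin _ (by rw [hcndk]; exact List.mem_append_left _ (List.mem_singleton.mpr rfl)) heq
            · exact hmin _ (List.mem_append_right _ hm) heq
    · -- the scan keeps b
      have hstep : bScan nums marked b ((k : Int), nums.getD k 0) = b := by
        simp only [bScan]; rw [if_neg hc]
      rw [hstep]
      have hb' : b = -1 ∨ ∃ k' : Nat, b = (k' : Int) ∧ k' < nums.length ∧
          eligB marked ((k' : Int), nums.getD k' 0) ∧ ∀ q ∈ xs, b < q.1 := by
        rcases hb with rfl | ⟨k', rfl, hk', he, hall⟩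
        · exact Or.inl rfl
        · exact Or.inr ⟨k', rfl, hk', he, fun q hq => hall q (List.mem_cons_of_mem _ hq)⟩
      have hres := ih b hsh' hpw.2 hb'
      -- the skipped pair is either ineligible, or not smaller than the candidate b
      rcases hres with ⟨hr, hall⟩ | ⟨k₀, hr, hk₀, hmem, he₀, hmin⟩
      · -- everything so far ineligible; p must be ineligible too (else b<0 would fire)
        refine Or.inl ⟨hr, ?_⟩
        intro q hq
        rcases List.mem_append.mp hq with hm | hm
        · exact hall _ (List.mem_append_left _ hm)
        · rcases List.mem_cons.mp hm with rfl | hm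
          · rintro ⟨h1, h2⟩
            rcases hb with rfl | ⟨k', rfl, hk', he', -⟩
            · exact hc ⟨h1, h2, Or.inl (by norm_num)⟩
            · refine (hall (((k' : Int)), nums.getD ((k' : Int)).toNat 0)
                (List.mem_append_left _ ?_)) ?_
              · simp only [cnd]; rw [if_neg (by omega)]; simp
              · simpa using he'
          · exact hall _ (List.mem_append_right _ hm)
      · refine Or.inr ⟨k₀, hr, hk₀, ?_, he₀, ?_⟩
        · rcases List.mem_append.mp hmem with hm | hm
          · exact List.mem_append_left _ hm
          · exact List.mem_append_right _ (List.mem_cons_of_mem _ hm)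
        · intro q hq heq
          rcases List.mem_append.mp hq with hm | hm
          · exact hmin _ (List.mem_append_left _ hm) heq
          · rcases List.mem_cons.mp hm with rfl | hm
            · -- q = (k, nums[k]) eligible but the scan skipped it: nums[k'] ≤ nums[k]
              rcases hb with rfl | ⟨k', hbk, hk', he', hall'⟩
              · exact absurd ⟨heq.1, heq.2, Or.inl (by norm_num)⟩ hc
              · subst hbk
                have hge : nums.getD k' 0 ≤ nums.getD k 0 := by
                  by_contra hlt
                  exact hc ⟨heq.1, heq.2, Or.inr (by rw [PySem.List.pyGetD_natCast]; omega)⟩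
                have h₀' := hmin ((k' : Int), nums.getD k' 0)
                  (List.mem_append_left _ (by
                    simp only [cnd]; rw [if_neg (by omega)]
                    simp)) he'
                have hk'k : ((k' : Int)) < ((k : Int)) := hall' _ (List.mem_cons_self ..)
                rw [ple_mk] at h₀' ⊢
                omega
            · exact hmin _ (List.mem_append_right _ hm) heq

-- corollary: bFind is the lex-least eligible pair of enumerate(nums)
theorem bFind_min (nums : List Int) (marked : List Bool) :
    isMin nums marked (bFind nums marked) (PySem.List.enumerate nums) := by
  have h := find_inv nums marked (PySem.List.enumerate nums) (-1)
    (by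
      intro p hp
      rw [PySem.List.mem_enumerate_iff] at hp
      obtain ⟨k, hk, rfl⟩ := hp
      exact ⟨k, hk, by rw [List.getD_eq_getElem nums 0 hk]; simp⟩)
    (PySem.List.pairwise_lt_enumerate nums 0)
    (Or.inl rfl)
  simpa [cnd, bFind] using h

-- skipping ineligible pairs leaves the ideal fold's state unchanged
theorem foldl_bStep_skip (t : List (Int × Int)) (m : PySem.Set Int) (sc : Int)
    (h : ∀ p ∈ t, p.2 < 1 ∨ p.1 ∈ m) : t.foldl bStep (m, sc) = (m, sc) := by
  induction t with
  | nil => rfl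
  | cons p t ih =>
    rw [List.foldl_cons]
    have : bStep (m, sc) p = (m, sc) := by
      simp only [bStep]; rw [if_pos (h p (List.mem_cons_self ..))]
    rw [this]
    exact ih (fun q hq => h q (List.mem_cons_of_mem _ hq))

-- eligibility wrt the boolean array ↔ wrt the marked set, via the pointwise invariant
theorem elig_iff (nums : List Int) (marked : List Bool) (m : PySem.Set Int)
    (hiff : ∀ j : Nat, j < nums.length → (marked.getD j false = true ↔ ((j : Int) ∈ m)))
    (k : Nat) (hk : k < nums.length) :
    eligB marked ((k : Int), nums.getD k 0) ↔ (1 ≤ nums.getD k 0 ∧ ((k : Int)) ∉ m) := by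
  unfold eligB
  simp only [PySem.List.pyGetD_natCast]
  have h := hiff k hk
  constructor
  · rintro ⟨h1, h2⟩
    refine ⟨h1, fun hm => ?_⟩
    rw [h.mpr hm] at h2
    cases h2
  · rintro ⟨h1, h2⟩
    refine ⟨h1, ?_⟩
    rcases Bool.eq_false_or_eq_true (marked.getD k false) with hb | hb
    · exact absurd (h.mp hb) h2
    · exact hb

theorem length_bMark (marked : List Bool) (k : Nat) (n : Nat) :
    (bMark marked ((k : Int)) n).length = marked.length := by
  unfold bMark
  split_ifs <;> simp [PySem.List.length_pySetD]

-- pointwise description of B's three boolean writes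
theorem bMark_getD (marked : List Bool) (k n j : Nat)
    (hlen : marked.length = n) (hk : k < n) (hj : j < n) :
    ((bMark marked ((k : Int)) n).getD j false = true) ↔
      (marked.getD j false = true ∨ j = k ∨ j + 1 = k ∨ j = k + 1) := by
  unfold bMark
  have e1 : ((k : Int)) + 1 = (((k + 1 : Nat)) : Int) := by omega
  by_cases hk1 : k + 1 < n
  · rw [if_pos (show ((k : Int)) + 1 < ((n : Nat) : Int) by omega)]
    by_cases hk0 : 0 < k
    · have e0 : ((k : Int)) - 1 = (((k - 1 : Nat)) : Int) := by omega
      rw [if_pos (show ((k : Int)) > 0 by omega), e0, e1]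
      simp only [PySem.List.pySetD_natCast]
      rw [getD_set, getD_set, getD_set]
      simp only [List.length_set, hlen]
      split_ifs <;> simp_all <;> omega
    · rw [if_neg (show ¬ ((k : Int)) > 0 by omega), e1]
      simp only [PySem.List.pySetD_natCast]
      rw [getD_set, getD_set]
      simp only [List.length_set, hlen]
      split_ifs <;> simp_all
      omega
  · rw [if_neg (show ¬ ((k : Int)) + 1 < ((n : Nat) : Int) by omega)]
    by_cases hk0 : 0 < k
    · have e0 : ((k : Int)) - 1 = (((k - 1 : Nat)) : Int) := by omega
      rw [if_pos (show ((k : Int)) > 0 by omega), e0]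
      simp only [PySem.List.pySetD_natCast]
      rw [getD_set, getD_set]
      simp only [List.length_set, hlen]
      split_ifs <;> simp_all <;> omega
    · rw [if_neg (show ¬ ((k : Int)) > 0 by omega)]
      simp only [PySem.List.pySetD_natCast]
      rw [getD_set]
      simp only [hlen]
      split_ifs with h1
      · simp; omega
      · constructor
        · intro h; exact Or.inl h
        · rintro (h | h | h | h)
          · exact h
          · exact absurd ⟨by omega, by omega⟩ h1
          · omega
          · omega

-- membership in the ideal fold's updated set, at a Nat index
theorem mem_update3 (m : PySem.Set Int) (k j : Nat) :
    (((j : Int)) ∈ PySem.Set.update m [((k : Int)) - 1, ((k : Int)), ((k : Int)) + 1]) ↔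
      (((j : Int)) ∈ m ∨ j = k ∨ j + 1 = k ∨ j = k + 1) := by
  rw [PySem.Set.mem_update]
  simp only [List.mem_cons, List.not_mem_nil, or_false]
  constructor
  · rintro (h | h | h | h)
    · exact Or.inl h
    · right; right; left; omega
    · right; left; omega
    · right; right; right; omega
  · rintro (h | h | h | h)
    · exact Or.inl h
    · right; right; left; omega
    · right; left; omega
    · right; right; right; omega

-- main loop correspondence: B's fueled while-loop computes the ideal fold over the
-- unprocessed suffix t of the lex-sorted pair list s
theorem loop_eq (nums : List Int) (s : List (Int × Int))
    (hshape : ∀ p ∈ s, ∃ k : Nat, k < nums.length ∧ p = ((k : Int), nums.getD k 0))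
    (hperm : s.Perm (PySem.List.enumerate nums))
    (hlex : s.Pairwise plt) :
    ∀ (N : Nat) (t pre : List (Int × Int)) (m : PySem.Set Int) (marked : List Bool)
      (sc : Int) (fuel : Nat),
      t.length ≤ N →
      s = pre ++ t →
      (∀ p ∈ pre, p.2 < 1 ∨ p.1 ∈ m) →
      marked.length = nums.length →
      (∀ j : Nat, j < nums.length → (marked.getD j false = true ↔ ((j : Int) ∈ m))) →
      t.length + 1 ≤ fuel →
      bLoop nums fuel marked sc = (t.foldl bStep (m, sc)).2 := by
  intro N
  induction N with
  | zero =>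
    intro t pre m marked sc fuel hN hsplit hpre hlen hiff hfuel
    have ht : t = [] := List.length_eq_zero_iff.mp (by omega)
    subst ht
    obtain ⟨f, rfl⟩ : ∃ f, fuel = f + 1 := ⟨fuel - 1, by omega⟩
    have hnone : bFind nums marked = -1 := by
      rcases bFind_min nums marked with ⟨hr, -⟩ | ⟨k₀, hr, hk₀, hmem, he₀, -⟩
      · exact hr
      · exfalso
        have hin : ((k₀ : Int), nums.getD k₀ 0) ∈ s := hperm.mem_iff.mpr hmem
        rw [hsplit, List.append_nil] at hin
        have := hpre _ hin
        rw [elig_iff nums marked m hiff k₀ hk₀] at he₀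
        simp only at this
        rcases this with h | h
        · omega
        · exact he₀.2 h
    show bLoop nums (f + 1) marked sc = _
    simp only [bLoop, hnone]
    rw [if_pos (by norm_num)]
    rfl
  | succ N ih =>
    intro t pre m marked sc fuel hN hsplit hpre hlen hiff hfuel
    obtain ⟨f, rfl⟩ : ∃ f, fuel = f + 1 := ⟨fuel - 1, by omega⟩
    rcases hfind : t.find? (fun p => decide (1 ≤ p.2 ∧ p.1 ∉ m)) with _ | q
    · -- no eligible pair left anywhere: the loop breaks, the fold skips everything
      rw [List.find?_eq_none] at hfind
      have htin : ∀ p ∈ t, p.2 < 1 ∨ p.1 ∈ m := by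
        intro p hp
        have := hfind p hp
        simp only [decide_eq_true_eq] at this
        by_cases h1 : 1 ≤ p.2
        · right
          by_contra h2
          exact this ⟨h1, h2⟩
        · left; omega
      have hnone : bFind nums marked = -1 := by
        rcases bFind_min nums marked with ⟨hr, -⟩ | ⟨k₀, hr, hk₀, hmem, he₀, -⟩
        · exact hr
        · exfalso
          have hin : ((k₀ : Int), nums.getD k₀ 0) ∈ s := hperm.mem_iff.mpr hmem
          rw [elig_iff nums marked m hiff k₀ hk₀] at he₀
          rw [hsplit] at hin
          rcases List.mem_append.mp hin with h | h
          · rcases hpre _ h with h' | h'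
            · simp only at h'; omega
            · exact he₀.2 h'
          · rcases htin _ h with h' | h'
            · simp only at h'; omega
            · exact he₀.2 h'
      show bLoop nums (f + 1) marked sc = _
      simp only [bLoop, hnone]
      rw [if_pos (by norm_num), foldl_bStep_skip t m sc htin]
    · -- q is the first eligible pair of t: the scan finds exactly q.1
      rw [List.find?_eq_some_iff_append] at hfind
      obtain ⟨hqe, t₁, t₂, rfl, ht₁⟩ := hfind
      simp only [decide_eq_true_eq] at hqe
      have ht₁' : ∀ p ∈ t₁, p.2 < 1 ∨ p.1 ∈ m := by
        intro p hp
        have := ht₁ p hp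
        simp only [Bool.not_eq_eq_eq_not, Bool.not_true, decide_eq_false_iff_not] at this
        by_cases h1 : 1 ≤ p.2
        · right
          by_contra h2
          exact this ⟨h1, h2⟩
        · left; omega
      have hqs : q ∈ s := by
        rw [hsplit]
        exact List.mem_append_right _ (List.mem_append_right _ (List.mem_cons_self ..))
      obtain ⟨kq, hkq, hq⟩ := hshape q hqs
      have heq : eligB marked ((kq : Int), nums.getD kq 0) := by
        rw [elig_iff nums marked m hiff kq hkq]
        rw [hq] at hqe
        exact hqe
      -- bFind returns kq
      have hfindk : bFind nums marked = ((kq : Int)) := by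
        rcases bFind_min nums marked with ⟨-, hall⟩ | ⟨k₀, hr, hk₀, hmem, he₀, hmin⟩
        · exfalso
          exact hall _ (hperm.mem_iff.mp (by rw [← hq]; exact hqs)) heq
        · have h₀s : ((k₀ : Int), nums.getD k₀ 0) ∈ s := hperm.mem_iff.mpr hmem
          rw [hsplit] at h₀s
          have h₀e : 1 ≤ nums.getD k₀ 0 ∧ ((k₀ : Int)) ∉ m :=
            (elig_iff nums marked m hiff k₀ hk₀).mp he₀
          -- the eligible pair k₀ cannot sit in pre or t₁
          have h₀mem : ((k₀ : Int), nums.getD k₀ 0) ∈ q :: t₂ := by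
            rcases List.mem_append.mp h₀s with h | h
            · exfalso
              rcases hpre _ h with h' | h'
              · simp only at h'; omega
              · exact h₀e.2 h'
            · rcases List.mem_append.mp h with h | h
              · exfalso
                rcases ht₁' _ h with h' | h'
                · simp only at h'; omega
                · exact h₀e.2 h'
              · exact h
          rcases List.mem_cons.mp h₀mem with h | h
          · rw [hr]
            simpa using congrArg Prod.fst (h.trans hq)
          · -- k₀ strictly after q in lex order contradicts minimality
            exfalso
            have hpw : (q :: t₂).Pairwise plt := by
              have := hsplit ▸ hlex
              rw [List.pairwise_append] at this
              have := this.2.1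
              rw [List.pairwise_append] at this
              exact this.2.1
            rw [List.pairwise_cons] at hpw
            have hqlt : plt q ((k₀ : Int), nums.getD k₀ 0) := hpw.1 _ h
            have hle : ple ((k₀ : Int), nums.getD k₀ 0) q :=
              hmin q (hperm.mem_iff.mp hqs) (by rw [hq]; exact heq)
            rw [hq] at hqlt hle
            rw [plt_mk] at hqlt
            rw [ple_mk] at hle
            omega
      -- one step of the loop = skip t₁ then process q in the ideal fold
      show bLoop nums (f + 1) marked sc = _
      simp only [bLoop, hfindk]
      rw [if_neg (by simp)]
      rw [List.foldl_append, foldl_bStep_skip t₁ m sc ht₁', List.foldl_cons]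
      have h0e : 1 ≤ nums.getD kq 0 ∧ ((kq : Int)) ∉ m :=
        (elig_iff nums marked m hiff kq hkq).mp heq
      have hbq : bStep (m, sc) q =
          (PySem.Set.update m [((kq : Int)) - 1, ((kq : Int)), ((kq : Int)) + 1],
           sc + nums.getD kq 0) := by
        rw [hq]
        simp only [bStep]
        have hno : ¬(((((kq : Int)), nums.getD kq 0)).2 < 1 ∨
            ((((kq : Int)), nums.getD kq 0)).1 ∈ m) := by
          rintro (h | h)
          · simp only at h; omega
          · exact h0e.2 h
        rw [if_neg hno]
      rw [hbq]
      have hget : PySem.List.pyGetD nums ((kq : Int)) 0 = nums.getD kq 0 := by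
        simp
      rw [hget]
      exact ih t₂ (pre ++ t₁ ++ [q])
        (PySem.Set.update m [((kq : Int)) - 1, ((kq : Int)), ((kq : Int)) + 1])
        (bMark marked ((kq : Int)) nums.length)
        (sc + nums.getD kq 0) f
        (by simp only [List.length_append, List.length_cons] at hN ⊢; omega)
        (by rw [hsplit]; simp)
        (by
          intro p hp
          rcases List.mem_append.mp hp with hp' | hp'
          · rcases List.mem_append.mp hp' with h | h
            · rcases hpre p h with h' | h'
              · exact Or.inl h'
              · exact Or.inr (PySem.Set.mem_update m _ _ |>.mpr (Or.inl h'))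
            · rcases ht₁' p h with h' | h'
              · exact Or.inl h'
              · exact Or.inr (PySem.Set.mem_update m _ _ |>.mpr (Or.inl h'))
          · simp only [List.mem_singleton] at hp'
            subst hp'
            right
            rw [hq]
            exact PySem.Set.mem_update m _ _ |>.mpr (Or.inr (by simp))
        )
        (by rw [length_bMark]; exact hlen)
        (by
          intro j hj
          rw [bMark_getD marked kq nums.length j hlen hkq hj, mem_update3, hiff j hj])
        (by simp only [List.length_append, List.length_cons] at hfuel; omega)

-- ===== VERDICT (by name: the statement is the Claim_ definition above) =====
theorem findScore2_spec : Claim_equal_findScore2 := by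
  intro nums _
  unfold Spec_findScore2 findScore2 findScore2_alt
  have hshape : ∀ p ∈ PySem.List.sorted (PySem.List.enumerate nums) (fun x => x.2) false,
      ∃ k : Nat, k < nums.length ∧ p = ((k : Int), nums.getD k 0) := by
    intro p hp
    rw [PySem.List.mem_sorted, PySem.List.mem_enumerate_iff] at hp
    obtain ⟨k, hk, rfl⟩ := hp
    exact ⟨k, hk, by rw [List.getD_eq_getElem nums 0 hk]; simp⟩
  have hperm : (PySem.List.sorted (PySem.List.enumerate nums) (fun x => x.2) false).Perm
      (PySem.List.enumerate nums) := PySem.List.sorted_perm _ _ _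
  have hlex := sorted_lex (PySem.List.enumerate nums) (PySem.List.pairwise_lt_enumerate nums 0)
  have hA : (((PySem.List.sorted (PySem.List.enumerate nums) (fun x => x.2) false).map
      (fun x => x.1)).foldl aStep (nums, 0)).2 =
      ((PySem.List.sorted (PySem.List.enumerate nums) (fun x => x.2) false).foldl bStep
        (PySem.Set.empty, 0)).2 := by
    apply loop_inv nums
    · intro p hp
      rw [PySem.List.mem_sorted, PySem.List.mem_enumerate_iff] at hp
      obtain ⟨k, hk, rfl⟩ := hp
      exact ⟨k, hk, by simp⟩
    · rfl
    · intro j hj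
      simp [PySem.Set.empty]
  have hB : bLoop nums (nums.length + 1) (List.replicate nums.length false) 0 =
      ((PySem.List.sorted (PySem.List.enumerate nums) (fun x => x.2) false).foldl bStep
        (PySem.Set.empty, 0)).2 := by
    have hslen : (PySem.List.sorted (PySem.List.enumerate nums) (fun x => x.2) false).length =
        nums.length := by
      rw [hperm.length_eq, PySem.List.length_enumerate]
    exact loop_eq nums _ hshape hperm hlex nums.length _ [] PySem.Set.empty _ 0
      (nums.length + 1) (by omega) rfl (by simp) (by simp)
      (by intro j hj; rw [List.getD_replicate _ hj]; simp [PySem.Set.empty]) (by omega)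
  rw [hA, hB]
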